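-- pv_equiv track=rewrite | github.com/chrishayuk/chuk-mlx | src/chuk_lazarus/data/tokenizers/vocab_manager.py | extend_vocabulary
-- ===== SOURCE A (Python) =====
-- def extend_vocabulary(
--     vocab: dict[str, int],
--     new_tokens: list[str],
--     start_id: int | None = None,
-- ) -> dict[str, int]:
--     """
--     Add new tokens to vocabulary with proper IDs.
--
--     Args:
--         vocab: Existing vocabulary
--         new_tokens: List of new tokens to add
--         start_id: Starting ID for new tokens (uses max+1 if None)
--
--     Returns:
--         Extended vocabulary
--     """
--     extended = vocab.copy()
--
--     if start_id is None:
--         start_id = max(vocab.values()) + 1 if vocab else 0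
--
--     current_id = start_id
--     for token in new_tokens:
--         if token not in extended:
--             extended[token] = current_id
--             current_id += 1
--
--     return extended
-- ===== SOURCE B (Python) =====
-- def extend_vocabulary(vocab, new_tokens, start_id=None):
--     if start_id is None:
--         start_id = max(vocab.values()) + 1 if vocab else 0
--     # first-occurrence position of every token of the batch
--     first = {}
--     for pos, tok in enumerate(new_tokens):
--         first.setdefault(tok, pos)
--     # positions of the genuinely new tokens, put in ascending order
--     novel_pos = sorted(pos for tok, pos in first.items() if tok not in vocab)
--     extended = dict(vocab)
--     for rank, pos in enumerate(novel_pos):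
--         extended[new_tokens[pos]] = start_id + rank
--     return extended
-- ===== Notes on version B (the rewrite author's own statement) =====
-- stated objective: alternative
-- what changed: Instead of A's single mutating loop with a growing dict and a running counter, B builds a first-occurrence position index with setdefault, sorts the positions of the novel tokens, and assigns each token id as start_id + rank of its first-occurrence position, retrieving the token by indexing new_tokens.
import Mathlib
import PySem

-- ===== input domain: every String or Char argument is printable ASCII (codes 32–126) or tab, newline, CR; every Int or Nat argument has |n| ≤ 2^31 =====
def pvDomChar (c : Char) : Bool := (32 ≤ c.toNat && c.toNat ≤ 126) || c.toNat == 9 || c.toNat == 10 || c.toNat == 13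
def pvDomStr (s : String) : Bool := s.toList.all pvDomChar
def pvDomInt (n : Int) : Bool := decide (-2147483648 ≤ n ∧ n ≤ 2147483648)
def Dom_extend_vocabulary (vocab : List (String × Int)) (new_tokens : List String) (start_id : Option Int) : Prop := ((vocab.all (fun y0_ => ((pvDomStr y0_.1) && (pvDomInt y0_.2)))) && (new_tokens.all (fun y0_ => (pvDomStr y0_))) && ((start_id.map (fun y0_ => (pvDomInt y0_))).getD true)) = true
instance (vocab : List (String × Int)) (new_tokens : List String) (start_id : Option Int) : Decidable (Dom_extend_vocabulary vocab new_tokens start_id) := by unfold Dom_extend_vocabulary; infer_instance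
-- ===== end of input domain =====

-- B replaces A's single mutating loop (growing dict + running counter) by a first-occurrence
-- position index, a sort of the novel positions, and rank-based id assignment; objective:
-- alternative algorithm, same result.

-- ===== PORT A =====
-- literal port of A: copy the dict, compute start_id (max+1 or 0), then one loop holding
-- the growing dict and the running counter.
def extend_vocabulary (vocab : List (String × Int)) (new_tokens : List String) (start_id : Option Int) : List (String × Int) :=
  let extended := PySem.Dict.ofList vocab
  let start : Int :=
    match start_id with
    | some s => s
    | none =>
        match PySem.List.max? (PySem.Dict.ofList vocab).values (fun x => x) with
        | some m => m + 1   -- max(vocab.values()) + 1 when vocab is non-empty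
        | none => 0         -- vocab empty
  let fin := new_tokens.foldl
    (fun (st : PySem.Dict String Int × Int) token =>
      if st.1.contains token then st
      else (st.1.insert token st.2, st.2 + 1)) (extended, start)
  fin.1.items

-- ===== PORT B =====
-- literal port of Source B: build the dict `first` of first-occurrence positions with setdefault,
-- sort the positions of the tokens not in vocab, then assign start + rank to the token found
-- by indexing new_tokens at each position (the index is always in range, so pyGetD's default
-- "" is never used).
def extend_vocabulary_alt (vocab : List (String × Int)) (new_tokens : List String) (start_id : Option Int) : List (String × Int) :=
  let start : Int :=
    match start_id with
    | some s => s
    | none =>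
        match PySem.List.max? (PySem.Dict.ofList vocab).values (fun x => x) with
        | some m => m + 1
        | none => 0
  let first := (PySem.List.enumerate new_tokens 0).foldl
      (fun (d : PySem.Dict String Int) p => d.setdefault p.2 p.1) PySem.Dict.empty
  let novel_pos := PySem.List.sorted
      ((first.items.filter (fun p => !(PySem.Dict.ofList vocab).contains p.1)).map (·.2))
      (fun x => x) false
  ((PySem.List.enumerate novel_pos 0).foldl
      (fun (d : PySem.Dict String Int) p =>
        d.insert (PySem.List.pyGetD new_tokens p.2 "") (start + p.1))
      (PySem.Dict.ofList vocab)).items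

-- ===== PRECONDITION & SPEC =====
def Spec_extend_vocabulary (vocab : List (String × Int)) (new_tokens : List String) (start_id : Option Int) (out : List (String × Int)) : Prop := out = extend_vocabulary_alt vocab new_tokens start_id
instance (vocab : List (String × Int)) (new_tokens : List String) (start_id : Option Int) (out : List (String × Int)) : Decidable (Spec_extend_vocabulary vocab new_tokens start_id out) := by unfold Spec_extend_vocabulary; infer_instance

-- ===== CLAIM (what is proved, stated in full; the proofs are below) =====
def Claim_equal_extend_vocabulary : Prop := ∀ (vocab : List (String × Int)) (new_tokens : List String) (start_id : Option Int), Dom_extend_vocabulary vocab new_tokens start_id → Spec_extend_vocabulary vocab new_tokens start_id (extend_vocabulary vocab new_tokens start_id)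

-- ===== LEMMAS AND PROOFS =====

-- the order-preserving list of tokens of ts not in `seen` (first occurrences only)
def pvNovel (seen : PySem.Set String) : List String → List String
  | [] => []
  | t :: ts => if PySem.Set.contains seen t then pvNovel seen ts
               else t :: pvNovel (PySem.Set.add seen t) ts

-- the (token, id) pairs that get merged in, as a recursion on the token list
def pvPairsFrom (id : Int) : List String → List (String × Int)
  | [] => []
  | t :: ts => (t, id) :: pvPairsFrom (id + 1) ts

-- the (token, first-occurrence position) pairs B's setdefault loop accumulates
def pvFirst (seen : PySem.Set String) (s : Int) : List String → List (String × Int)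
  | [] => []
  | t :: ts => if PySem.Set.contains seen t then pvFirst seen (s + 1) ts
               else (t, s) :: pvFirst (PySem.Set.add seen t) (s + 1) ts

lemma pvContains_add (s : PySem.Set String) (t x : String) :
    PySem.Set.contains (PySem.Set.add s t) x = (x == t || PySem.Set.contains s x) := by
  rw [Bool.eq_iff_iff]
  simp [PySem.Set.mem_add, beq_iff_eq, or_comm]

-- A's loop IS "merge pvNovel, enumerated from the counter, into the dict"
lemma pvMain (ts : List String) (d : PySem.Dict String Int) (seen : PySem.Set String) (id : Int)
    (h : ∀ x, PySem.Set.contains seen x = d.contains x) :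
    (ts.foldl (fun (st : PySem.Dict String Int × Int) token =>
        if st.1.contains token then st
        else (st.1.insert token st.2, st.2 + 1)) (d, id)).1
    = d.update (pvPairsFrom id (pvNovel seen ts)) := by
  induction ts generalizing d seen id with
  | nil => simp [pvNovel, pvPairsFrom, PySem.Dict.update]
  | cons t ts ih =>
      simp only [List.foldl_cons, pvNovel]
      by_cases hc : d.contains t
      · rw [if_pos hc, if_pos ((h t).trans hc)]
        exact ih d seen id h
      · rw [if_neg hc, if_neg (by rw [h t]; exact hc)]
        rw [ih (d.insert t id) (PySem.Set.add seen t) (id + 1) ?_]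
        · simp [PySem.Dict.update, pvPairsFrom]
        · intro x
          rw [pvContains_add, PySem.Dict.contains_insert, h x]

-- B's setdefault loop appends exactly the pvFirst pairs
lemma pvFirst_items (ts : List String) (s : Int) (d : PySem.Dict String Int)
    (seen : PySem.Set String) (h : ∀ x, PySem.Set.contains seen x = d.contains x) :
    ((PySem.List.enumerate ts s).foldl
        (fun (d : PySem.Dict String Int) p => d.setdefault p.2 p.1) d).items
    = d.items ++ pvFirst seen s ts := by
  induction ts generalizing s d seen with
  | nil => simp [pvFirst, PySem.List.enumerate_nil]
  | cons t ts ih =>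
      rw [PySem.List.enumerate_cons]
      simp only [List.foldl_cons, pvFirst]
      by_cases hc : d.contains t
      · rw [PySem.Dict.setdefault_of_contains d s hc, if_pos ((h t).trans hc)]
        exact ih (s + 1) d seen h
      · rw [PySem.Dict.setdefault_of_not_contains d s (by simpa using hc),
            if_neg (by rw [h t]; exact hc)]
        rw [ih (s + 1) (d.insert t s) (PySem.Set.add seen t) ?_]
        · rw [PySem.Dict.items_insert_of_not_contains d s (by simpa using hc)]
          simp
        · intro x
          rw [pvContains_add, PySem.Dict.contains_insert, h x]

-- every pvFirst pair is (ts[k], s + k) for some k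
lemma pvFirst_mem (ts : List String) (seen : PySem.Set String) (s : Int) :
    ∀ p ∈ pvFirst seen s ts, ∃ k : Nat, p.2 = s + (k : Int) ∧ ts[k]? = some p.1 := by
  induction ts generalizing seen s with
  | nil => simp [pvFirst]
  | cons t ts ih =>
      intro p hp
      simp only [pvFirst] at hp
      by_cases hc : PySem.Set.contains seen t
      · rw [if_pos hc] at hp
        obtain ⟨k, hk, hg⟩ := ih seen (s + 1) p hp
        exact ⟨k + 1, by push_cast; omega, by simpa using hg⟩
      · rw [if_neg hc, List.mem_cons] at hp
        rcases hp with rfl | hp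
        · exact ⟨0, by simp, by simp⟩
        · obtain ⟨k, hk, hg⟩ := ih (PySem.Set.add seen t) (s + 1) p hp
          exact ⟨k + 1, by push_cast; omega, by simpa using hg⟩

-- pvFirst's positions are strictly increasing
lemma pvFirst_pairwise (ts : List String) (seen : PySem.Set String) (s : Int) :
    (pvFirst seen s ts).Pairwise (fun a b => a.2 < b.2) := by
  induction ts generalizing seen s with
  | nil => simp [pvFirst]
  | cons t ts ih =>
      simp only [pvFirst]
      by_cases hc : PySem.Set.contains seen t
      · rw [if_pos hc]; exact ih seen (s + 1)
      · rw [if_neg hc]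
        refine List.Pairwise.cons ?_ (ih (PySem.Set.add seen t) (s + 1))
        intro p hp
        obtain ⟨k, hk, -⟩ := pvFirst_mem ts (PySem.Set.add seen t) (s + 1) p hp
        simp only
        omega

-- filtering pvFirst by "not already in vocab" and keeping tokens gives pvNovel with the
-- combined seen set
lemma pvFilter_first (V : PySem.Dict String Int) (ts : List String)
    (seen1 seen2 : PySem.Set String) (s : Int)
    (h : ∀ x, PySem.Set.contains seen2 x = (PySem.Set.contains seen1 x || V.contains x)) :
    ((pvFirst seen1 s ts).filter (fun p => !V.contains p.1)).map (·.1)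
      = pvNovel seen2 ts := by
  induction ts generalizing seen1 seen2 s with
  | nil => simp [pvFirst, pvNovel]
  | cons t ts ih =>
      simp only [pvFirst, pvNovel]
      by_cases h1 : PySem.Set.contains seen1 t
      · rw [if_pos h1, if_pos (by rw [h t, h1]; simp)]
        exact ih seen1 seen2 (s + 1) h
      · rw [if_neg h1]
        by_cases hv : V.contains t
        · rw [if_pos (by rw [h t, hv]; simp)]
          simp only [List.filter_cons, hv, Bool.not_true]
          exact ih (PySem.Set.add seen1 t) seen2 (s + 1) (by
            intro x
            rw [h x, pvContains_add]
            by_cases hx : x = t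
            · subst hx
              simp [hv]
            · have hbeq : (x == t) = false := by simp [hx]
              rw [hbeq]
              simp)
        · have h1f : PySem.Set.contains seen1 t = false := by simpa using h1
          have hvf : V.contains t = false := by simpa using hv
          rw [if_neg (by rw [h t, h1f, hvf]; simp)]
          simp only [List.filter_cons, hvf, Bool.not_false]
          refine congrArg (t :: ·) ?_
          exact ih (PySem.Set.add seen1 t) (PySem.Set.add seen2 t) (s + 1) (by
            intro x
            rw [pvContains_add, pvContains_add, h x]
            cases x == t <;> simp)

lemma pvSeen_init (vocab : List (String × Int)) (x : String) :
    PySem.Set.contains (PySem.Set.ofList (PySem.Dict.ofList vocab).keys) x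
      = (PySem.Dict.ofList vocab).contains x := by
  rw [Bool.eq_iff_iff, PySem.Set.contains_iff, PySem.Set.mem_ofList]
  simp [PySem.Dict.contains, PySem.Dict.keys, List.any_eq_true, beq_iff_eq]

-- B's final insert loop over the enumerated positions is an update by pvPairsFrom
lemma pvFold_insert_enum (l : List Int) (f : Int → String) (start s : Int)
    (d : PySem.Dict String Int) :
    (PySem.List.enumerate l s).foldl
        (fun (d : PySem.Dict String Int) p => d.insert (f p.2) (start + p.1)) d
    = d.update (pvPairsFrom (start + s) (l.map f)) := by
  induction l generalizing s d with
  | nil => simp [pvPairsFrom, PySem.List.enumerate_nil, PySem.Dict.update]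
  | cons x l ih =>
      rw [PySem.List.enumerate_cons]
      simp only [List.foldl_cons, List.map_cons, pvPairsFrom]
      rw [ih (s + 1) (d.insert (f x) (start + s))]
      simp only [PySem.Dict.update, List.foldl_cons]
      ring_nf

-- ===== VERDICT (by name: the statement is the Claim_ definition above) =====
theorem extend_vocabulary_spec : Claim_equal_extend_vocabulary := by
  intro vocab new_tokens start_id _
  unfold Spec_extend_vocabulary extend_vocabulary extend_vocabulary_alt
  simp only []
  set V := PySem.Dict.ofList vocab with hV
  -- A side
  rw [pvMain new_tokens V (PySem.Set.ofList V.keys) _ (pvSeen_init vocab)]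
  -- B side: the first dict's items
  rw [pvFirst_items new_tokens 0 PySem.Dict.empty PySem.Set.empty
        (by intro x; simp [PySem.Set.empty, PySem.Set.contains])]
  simp only [PySem.Dict.empty, List.nil_append]
  -- the filtered position list is already sorted
  set L : List Int := ((pvFirst PySem.Set.empty 0 new_tokens).filter
        (fun p => !V.contains p.1)).map (·.2) with hL
  have hpw : L.Pairwise (fun a b => (fun x : Int => x) a ≤ (fun x : Int => x) b) := by
    rw [hL]
    refine List.Pairwise.map _ (fun a b hab => le_of_lt hab) ?_
    exact ((pvFirst_pairwise new_tokens PySem.Set.empty 0).sublist List.filter_sublist)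
  rw [PySem.List.sorted_eq_self_of_pairwise L _ hpw]
  -- the insert loop over the positions
  rw [pvFold_insert_enum _ (fun pos => PySem.List.pyGetD new_tokens pos "") _ 0 V, add_zero]
  -- positions translate back to the tokens
  have hmap : (((pvFirst PySem.Set.empty 0 new_tokens).filter
        (fun p => !V.contains p.1)).map (·.2)).map
        (fun pos => PySem.List.pyGetD new_tokens pos "")
      = pvNovel (PySem.Set.ofList V.keys) new_tokens := by
    rw [List.map_map]
    rw [show ((fun pos => PySem.List.pyGetD new_tokens pos "") ∘ (·.2))
          = fun (p : String × Int) => PySem.List.pyGetD new_tokens p.2 "" from rfl]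
    rw [List.map_congr_left (g := (·.1)) ?_]
    · exact pvFilter_first V new_tokens PySem.Set.empty (PySem.Set.ofList V.keys) 0
        (by intro x; simp only [hV]; rw [pvSeen_init vocab]
            simp [PySem.Set.empty, PySem.Set.contains])
    · intro p hp
      obtain ⟨k, hk, hg⟩ := pvFirst_mem new_tokens PySem.Set.empty 0 p
        (List.mem_of_mem_filter hp)
      rw [hk]
      simp only [zero_add, PySem.List.pyGetD_natCast]
      simp [List.getD_eq_getElem?_getD, hg]
  rw [hmap]
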